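-- pv_equiv track=rewrite | github.com/makionakatsu/DiscordReportv2 | summarize_chat.py | categorize_messages_by_channel
-- ===== SOURCE A (Python) =====
-- def categorize_messages_by_channel(messages):
--     categorized_messages = {}
--     for message in messages:
--         channel_name = message['Channel']
--         if channel_name not in categorized_messages:
--             categorized_messages[channel_name] = []
--         categorized_messages[channel_name].append(message)
--     return categorized_messages
-- ===== SOURCE B (Python) =====
-- def categorize_messages_by_channel(messages):
--     channels = dict.fromkeys(m['Channel'] for m in messages)
--     return {c: [m for m in messages if m['Channel'] == c] for c in channels}
-- ===== Notes on version B (the rewrite author's own statement) =====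
-- stated objective: simpler
-- what changed: Replaces the single-pass mutate-a-dict grouping loop with a two-pass comprehension: dict.fromkeys collects the channels in first-appearance order, then one filtering comprehension per channel builds each group in one shot.
import Mathlib
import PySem

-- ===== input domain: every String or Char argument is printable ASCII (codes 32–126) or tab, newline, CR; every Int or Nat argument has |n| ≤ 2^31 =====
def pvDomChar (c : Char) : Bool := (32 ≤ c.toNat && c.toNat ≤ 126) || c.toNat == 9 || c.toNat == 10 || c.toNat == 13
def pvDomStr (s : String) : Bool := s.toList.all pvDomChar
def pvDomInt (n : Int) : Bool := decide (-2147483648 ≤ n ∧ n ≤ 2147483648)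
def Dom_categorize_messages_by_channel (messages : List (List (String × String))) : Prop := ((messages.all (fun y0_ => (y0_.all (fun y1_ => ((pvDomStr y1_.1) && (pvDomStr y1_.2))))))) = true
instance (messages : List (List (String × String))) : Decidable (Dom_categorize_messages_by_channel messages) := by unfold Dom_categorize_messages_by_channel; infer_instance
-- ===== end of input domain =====

-- ===== PORT A =====
-- B changes the decomposition only (two passes instead of one mutated dict); return-value equivalence, no mutation involved.
-- shared helper: message['Channel'] (first-match lookup in the association list; "" is never reached under Pre_)
def pvChannel (m : List (String × String)) : String := (List.lookup "Channel" m).getD ""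

-- A: one pass, building a dict, appending each message to its channel's list
def categorize_messages_by_channel (messages : List (List (String × String))) : List (String × List (List (String × String))) :=
  (messages.foldl (fun d message =>
      let channel_name := pvChannel message
      let d := if d.contains channel_name then d
               else d.insert channel_name ([] : List (List (String × String)))
      d.modify channel_name [] (fun xs => xs ++ [message]))
    PySem.Dict.empty).items

-- ===== PORT B =====
-- B: channels := dict.fromkeys(channel of each message)  (ordered dedup), then one filter per channel
def categorize_messages_by_channel_alt (messages : List (List (String × String))) : List (String × List (List (String × String))) :=
  let channels := PySem.List.dedup (messages.map pvChannel)
  channels.map (fun c => (c, messages.filter (fun m => pvChannel m == c)))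

-- ===== PRECONDITION & SPEC =====
-- Pre_ excludes exactly the inputs where some message lacks the 'Channel' key: there Python A raises KeyError (B raises too).
def Pre_categorize_messages_by_channel (messages : List (List (String × String))) : Prop :=
  (messages.all (fun m => (List.lookup "Channel" m).isSome)) = true
instance (messages : List (List (String × String))) : Decidable (Pre_categorize_messages_by_channel messages) := by unfold Pre_categorize_messages_by_channel; infer_instance
def pvWitness_categorize_messages_by_channel : (List (List (String × String))) :=
  [[("Channel", "general"), ("Text", "hi")], [("Channel", "dev"), ("Text", "yo")], [("Channel", "general"), ("Text", "bye")]]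
-- ===== SPEC =====
def Spec_categorize_messages_by_channel (messages : List (List (String × String))) (out : List (String × List (List (String × String)))) : Prop := out = categorize_messages_by_channel_alt messages
instance (messages : List (List (String × String))) (out : List (String × List (List (String × String)))) : Decidable (Spec_categorize_messages_by_channel messages out) := by unfold Spec_categorize_messages_by_channel; infer_instance

-- ===== CLAIM (what is proved, stated in full; the proofs are below) =====
def Claim_equal_categorize_messages_by_channel : Prop := ∀ (messages : List (List (String × String))), Dom_categorize_messages_by_channel messages → Pre_categorize_messages_by_channel messages → Spec_categorize_messages_by_channel messages (categorize_messages_by_channel messages)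

-- ===== LEMMAS AND PROOFS =====

-- the guarded body of A's loop is a single Dict.modify
theorem pvStepEq (d : PySem.Dict String (List (List (String × String)))) (k : String)
    (f : List (List (String × String)) → List (List (String × String))) :
    (if d.contains k then d else d.insert k []).modify k [] f = d.modify k [] f := by
  by_cases h : d.contains k = true
  · simp [h]
  · have h' : d.contains k = false := by simpa using h
    simp only [h, Bool.false_eq_true, if_false]
    rw [PySem.Dict.modify, PySem.Dict.modify, PySem.Dict.getD_insert_self,
      PySem.Dict.insert_insert_self, PySem.Dict.getD_of_not_contains (h := h')]

-- A's fold, rewritten as a pure modify-fold over (key, message) pairs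
theorem pvFoldEq (messages : List (List (String × String))) :
    messages.foldl (fun d message =>
      let channel_name := pvChannel message
      let d := if d.contains channel_name then d
               else d.insert channel_name ([] : List (List (String × String)))
      d.modify channel_name [] (fun xs => xs ++ [message])) PySem.Dict.empty
    = (messages.map (fun m => (pvChannel m, m))).foldl
        (fun d p => d.modify p.1 [] (fun xs => xs ++ [p.2])) PySem.Dict.empty := by
  rw [List.foldl_map]
  exact PySem.List.foldl_congr_mem _ _ _ _ (fun d m _ => pvStepEq d (pvChannel m) _)

-- ===== VERDICT (by name: the statement is the Claim_ definition above) =====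
theorem categorize_messages_by_channel_spec : Claim_equal_categorize_messages_by_channel := by
  intro messages _ _
  unfold Spec_categorize_messages_by_channel categorize_messages_by_channel categorize_messages_by_channel_alt
  rw [pvFoldEq]
  set l := messages.map (fun m => (pvChannel m, m)) with hl
  set D := l.foldl (fun d p => d.modify p.1 [] (fun xs => xs ++ [p.2])) PySem.Dict.empty with hD
  have hnd : D.keys.Nodup := by
    rw [hD]
    exact PySem.Dict.nodup_keys_foldl_modify_key l (fun p => p.1) [] (fun d p xs => xs ++ [p.2]) _ (by simp)
  have hkeys : D.keys = PySem.Set.ofList (messages.map pvChannel) := by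
    rw [hD]
    rw [PySem.Dict.keys_foldl_modify_key]
    simp [hl, PySem.Set.update_nil_left, List.map_map, Function.comp_def]
  have hget : ∀ c, D.getD c [] = messages.filter (fun m => pvChannel m == c) := by
    intro c
    rw [hD, PySem.Dict.getD_foldl_modify_append, PySem.Dict.getD_empty]
    simp [hl, List.filter_map, List.map_map, Function.comp_def]
  rw [PySem.Dict.items_eq_map_keys D hnd [], hkeys, PySem.List.dedup_eq_ofList]
  exact (List.map_congr_left (fun c _ => by rw [hget c]))
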